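-- pv_equiv track=rewrite | github.com/loveminpic/Daily-Coding | 삼성기출/미세먼지.py | moving_wind
-- ===== SOURCE A (Python) =====
-- import copy
--
-- def moving_wind(change_area, wind):
--     temp1 = copy.deepcopy(change_area[wind[0][0]][wind[0][1]])
--     change_area[wind[0][0]][wind[0][1]] = 0
--     for i in range(0, len(wind) - 1):
--         temp2 = copy.deepcopy(change_area[wind[i + 1][0]][wind[i + 1][1]])
--         change_area[wind[i + 1][0]][wind[i + 1][1]] = temp1
--         temp1 = temp2
--
--     return change_area
-- ===== SOURCE B (Python) =====
-- import copy
--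
-- def moving_wind(change_area, wind):
--     # gather the original values along the path, then scatter them back shifted by one
--     vals = [copy.deepcopy(change_area[r][c]) for r, c in wind]
--     r0, c0 = wind[0]
--     change_area[r0][c0] = 0
--     for (r, c), v in zip(wind[1:], vals):
--         change_area[r][c] = v
--     return change_area
-- ===== Notes on version B (the rewrite author's own statement) =====
-- stated objective: alternative
-- what changed: Replaces A's single sequential pass that threads a two-temporary swap chain through the grid with a gather-then-scatter decomposition: first collect all values along the path into a list, then write them back shifted by one position.
-- outside the precondition, e.g. on moving_wind([[1, 2]], [(0, 0), (0, 1), (0, 0), (0, 1)]): A returns [[2, 0]], B returns [[2, 1]]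
import Mathlib
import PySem

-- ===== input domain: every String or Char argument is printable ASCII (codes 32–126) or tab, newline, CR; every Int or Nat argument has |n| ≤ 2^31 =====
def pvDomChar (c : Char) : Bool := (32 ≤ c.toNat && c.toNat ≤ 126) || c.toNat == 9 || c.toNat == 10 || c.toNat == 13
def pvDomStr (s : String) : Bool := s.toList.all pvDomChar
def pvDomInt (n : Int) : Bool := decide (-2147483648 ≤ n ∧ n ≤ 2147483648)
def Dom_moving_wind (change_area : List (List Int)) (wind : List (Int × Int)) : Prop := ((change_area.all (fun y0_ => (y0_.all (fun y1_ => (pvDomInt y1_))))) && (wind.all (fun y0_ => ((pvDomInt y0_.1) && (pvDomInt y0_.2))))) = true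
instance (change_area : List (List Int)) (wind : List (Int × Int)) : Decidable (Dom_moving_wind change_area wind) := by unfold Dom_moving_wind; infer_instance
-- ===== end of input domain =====

-- B shifts the grid values along the path by gather-then-scatter instead of A's sequential
-- two-temporary swap chain (objective: alternative decomposition, same cost).
-- Both Pythons mutate change_area in place and return it; the equivalence proved here is
-- about the RETURN value.

-- shared subscript helpers: change_area[r][c] read and write, Python index semantics
def cellGet (g : List (List Int)) (r c : Int) : Int :=
  PySem.List.pyGetD (PySem.List.pyGetD g r []) c 0

def cellSet (g : List (List Int)) (r c : Int) (v : Int) : List (List Int) :=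
  PySem.List.pySetD g r (PySem.List.pySetD (PySem.List.pyGetD g r []) c v)

-- ===== PORT A =====
def moving_wind (change_area : List (List Int)) (wind : List (Int × Int)) : List (List Int) :=
  let w0 := PySem.List.pyGetD wind 0 ((0 : Int), (0 : Int))
  let temp1 := cellGet change_area w0.1 w0.2
  let g0 := cellSet change_area w0.1 w0.2 0
  let res := (PySem.List.pyRange 0 ((wind.length : Int) - 1) 1).foldl
    (fun (st : List (List Int) × Int) i =>
      let w := PySem.List.pyGetD wind (i + 1) ((0 : Int), (0 : Int))
      let temp2 := cellGet st.1 w.1 w.2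
      (cellSet st.1 w.1 w.2 st.2, temp2)) (g0, temp1)
  res.1

-- ===== PORT B =====
def moving_wind_alt (change_area : List (List Int)) (wind : List (Int × Int)) : List (List Int) :=
  let vals := wind.map (fun w => cellGet change_area w.1 w.2)
  let w0 := PySem.List.pyGetD wind 0 ((0 : Int), (0 : Int))
  let g0 := cellSet change_area w0.1 w0.2 0
  ((wind.drop 1).zip vals).foldl (fun h wv => cellSet h wv.1.1 wv.1.2 wv.2) g0

-- ===== PRECONDITION & SPEC =====
-- the Python-normalised (row, column) position a wind entry addresses (none = out of range)
def nCo (g : List (List Int)) (w : Int × Int) : Option Nat × Option Nat :=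
  (PySem.List.pyIdx? g.length w.1,
   PySem.List.pyIdx? (PySem.List.pyGetD g w.1 []).length w.2)

-- Pre_ excludes the empty wind (A raises IndexError on wind[0]) and out-of-range path cells
-- (IndexError); it also excludes winds that visit the same grid cell twice, where A's value is
-- an artefact of its sequential read-after-write temporary chain and B's gather-scatter value
-- is equally defensible (the path of the dust problem never repeats a cell).
def Pre_moving_wind (change_area : List (List Int)) (wind : List (Int × Int)) : Prop :=
  wind ≠ [] ∧
  (∀ w ∈ wind, PySem.Raise.InRange change_area.length w.1 ∧
      PySem.Raise.InRange (PySem.List.pyGetD change_area w.1 []).length w.2) ∧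
  (wind.map (nCo change_area)).Nodup

instance (change_area : List (List Int)) (wind : List (Int × Int)) : Decidable (Pre_moving_wind change_area wind) := by unfold Pre_moving_wind; infer_instance

def pvWitness_moving_wind : List (List Int) × (List (Int × Int)) :=
  ([[1, 2], [3, 4]], [(0, 0), (0, 1), (1, 1), (1, 0)])

def Spec_moving_wind (change_area : List (List Int)) (wind : List (Int × Int)) (out : List (List Int)) : Prop := out = moving_wind_alt change_area wind
instance (change_area : List (List Int)) (wind : List (Int × Int)) (out : List (List Int)) : Decidable (Spec_moving_wind change_area wind out) := by unfold Spec_moving_wind; infer_instance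

-- ===== CLAIM (what is proved, stated in full; the proofs are below) =====
def Claim_equal_moving_wind : Prop := ∀ (change_area : List (List Int)) (wind : List (Int × Int)), Dom_moving_wind change_area wind → Pre_moving_wind change_area wind → Spec_moving_wind change_area wind (moving_wind change_area wind)

-- ===== LEMMAS AND PROOFS =====

theorem pyIdx_lt (n k : Nat) (i : Int) (h : PySem.List.pyIdx? n i = some k) : k < n := by
  unfold PySem.List.pyIdx? at h
  split_ifs at h <;> simp_all <;> omega

theorem pyIdx_of_inRange (n : Nat) (i : Int) (h : PySem.Raise.InRange n i) :
    ∃ k : Nat, PySem.List.pyIdx? n i = some k ∧ k < n := by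
  obtain ⟨h1, h2⟩ := h
  unfold PySem.List.pyIdx?
  by_cases h3 : 0 ≤ i
  · refine ⟨i.toNat, ?_, by omega⟩
    rw [if_pos h3, if_pos h2]
  · refine ⟨n - (-i).toNat, ?_, by omega⟩
    rw [if_neg h3, if_pos h1]

theorem pyGetD_some {α : Type} (xs : List α) (i : Int) (d : α) (k : Nat)
    (hk : PySem.List.pyIdx? xs.length i = some k) (hklt : k < xs.length) :
    PySem.List.pyGetD xs i d = xs[k] := by
  unfold PySem.List.pyGetD PySem.List.pyGet?
  rw [hk]
  simp [List.getElem?_eq_getElem hklt]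

theorem pyGetD_none {α : Type} (xs : List α) (i : Int) (d : α)
    (hk : PySem.List.pyIdx? xs.length i = none) :
    PySem.List.pyGetD xs i d = d := by
  unfold PySem.List.pyGetD PySem.List.pyGet?
  rw [hk]
  rfl

theorem map_length_pySetD (g : List (List Int)) (r : Int) (row : List Int)
    (hrow : row.length = (PySem.List.pyGetD g r []).length) :
    (PySem.List.pySetD g r row).map List.length = g.map List.length := by
  unfold PySem.List.pySetD PySem.List.pySet?
  cases hk : PySem.List.pyIdx? g.length r with
  | none => simp
  | some k =>
    have hklt := pyIdx_lt _ _ _ hk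
    rw [pyGetD_some g r [] k hk hklt] at hrow
    simp only [Option.map_some, Option.getD_some, List.map_set]
    rw [hrow, show (g[k] : List Int).length = (List.map List.length g)[k]'(by simpa using hklt) by simp]
    exact List.set_getElem_self (by simpa using hklt)

theorem shape_cellSet (g : List (List Int)) (r c : Int) (v : Int) :
    (cellSet g r c v).map List.length = g.map List.length := by
  unfold cellSet
  exact map_length_pySetD g r _ (PySem.List.length_pySetD _ _ _)

theorem length_cellSet (g : List (List Int)) (r c : Int) (v : Int) :
    (cellSet g r c v).length = g.length := by
  have := congrArg List.length (shape_cellSet g r c v)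
  simpa using this

theorem rowLen_congr (g h : List (List Int)) (r : Int)
    (hs : g.map List.length = h.map List.length) :
    (PySem.List.pyGetD g r []).length = (PySem.List.pyGetD h r []).length := by
  have hlen : g.length = h.length := by
    have := congrArg List.length hs; simpa using this
  cases hk : PySem.List.pyIdx? h.length r with
  | none =>
    rw [pyGetD_none g r [] (by rw [hlen]; exact hk), pyGetD_none h r [] hk]
  | some k =>
    have hklt := pyIdx_lt _ _ _ hk
    rw [pyGetD_some g r [] k (by rw [hlen]; exact hk) (by omega),
        pyGetD_some h r [] k hk hklt]
    have h1 := congrArg (fun l => l[k]?) hs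
    simp only [List.getElem?_map, List.getElem?_eq_getElem hklt,
      List.getElem?_eq_getElem (show k < g.length by omega), Option.map_some,
      Option.some.injEq] at h1
    exact h1

theorem nCo_congr (g h : List (List Int)) (w : Int × Int)
    (hs : g.map List.length = h.map List.length) :
    nCo g w = nCo h w := by
  have hlen : g.length = h.length := by
    have := congrArg List.length hs; simpa using this
  unfold nCo
  rw [hlen, rowLen_congr g h w.1 hs]

-- reading a different cell after a write: unchanged
theorem cellGet_cellSet_ne (g : List (List Int)) (r c r' c' v : Int)
    (hr : PySem.Raise.InRange g.length r)
    (hc : PySem.Raise.InRange (PySem.List.pyGetD g r []).length c)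
    (hne : nCo g (r', c') ≠ nCo g (r, c)) :
    cellGet (cellSet g r c v) r' c' = cellGet g r' c' := by
  obtain ⟨k, hk, hklt⟩ := pyIdx_of_inRange _ _ hr
  have hrow : PySem.List.pyGetD g r [] = g[k] := pyGetD_some g r [] k hk hklt
  rw [hrow] at hc
  obtain ⟨j, hj, hjlt⟩ := pyIdx_of_inRange _ _ hc
  have hset : cellSet g r c v = g.set k ((g[k] : List Int).set j v) := by
    unfold cellSet
    rw [hrow]
    unfold PySem.List.pySetD PySem.List.pySet?
    rw [hk, hj]
    simp
  rw [hset]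
  unfold cellGet
  cases hk' : PySem.List.pyIdx? g.length r' with
  | none =>
    rw [pyGetD_none g r' [] hk',
        pyGetD_none (g.set k ((g[k] : List Int).set j v)) r' []
          (by rw [List.length_set]; exact hk')]
  | some k' =>
    have hklt' := pyIdx_lt _ _ _ hk'
    rw [pyGetD_some g r' [] k' hk' hklt',
        pyGetD_some (g.set k ((g[k] : List Int).set j v)) r' [] k'
          (by rw [List.length_set]; exact hk') (by simpa using hklt')]
    by_cases hkk : k' = k
    · subst hkk
      rw [List.getElem_set_self (by simpa using hklt')]
      -- same row: the column indices must differ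
      have hrow' : PySem.List.pyGetD g r' [] = g[k'] := pyGetD_some g r' [] k' hk' hklt'
      have hcol_ne : PySem.List.pyIdx? (g[k'] : List Int).length c' ≠ some j := by
        intro hcol
        apply hne
        unfold nCo
        rw [hrow', hrow]
        simp only [hk', hk, hcol, hj]
      cases hj' : PySem.List.pyIdx? (g[k'] : List Int).length c' with
      | none =>
        rw [pyGetD_none (g[k'] : List Int) c' 0 hj',
            pyGetD_none ((g[k'] : List Int).set j v) c' 0
              (by rw [List.length_set]; exact hj')]
      | some j' =>
        have hj'lt := pyIdx_lt _ _ _ hj'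
        have hjj : j' ≠ j := by intro h; apply hcol_ne; rw [hj', h]
        rw [pyGetD_some (g[k'] : List Int) c' 0 j' hj' hj'lt,
            pyGetD_some ((g[k'] : List Int).set j v) c' 0 j'
              (by rw [List.length_set]; exact hj') (by simpa using hj'lt)]
        rw [List.getElem_set_ne (show j ≠ j' by omega)]
    · rw [List.getElem_set_ne (show k ≠ k' by omega)]

-- the loop over range(0, len(wind)-1) reading wind[i+1] is a fold over wind.drop 1
theorem foldl_range_shift {β : Type} (w : Int × Int) (t : List (Int × Int))
    (F : β → (Int × Int) → β) (init : β) :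
  (PySem.List.pyRange 0 (((w :: t).length : Int) - 1) 1).foldl
      (fun st i => F st (PySem.List.pyGetD (w :: t) (i + 1) ((0 : Int), (0 : Int)))) init
    = t.foldl F init := by
  have hlen : ((w :: t).length : Int) - 1 = (t.length : Int) := by
    simp
  rw [hlen]
  have hcongr : ∀ init',
      (PySem.List.pyRange 0 (t.length : Int) 1).foldl
        (fun st i => F st (PySem.List.pyGetD (w :: t) (i + 1) ((0 : Int), (0 : Int)))) init'
      = (PySem.List.pyRange 0 (t.length : Int) 1).foldl
        (fun st i => F st (PySem.List.pyGetD t i ((0 : Int), (0 : Int)))) init' := by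
    intro init'
    apply PySem.List.foldl_congr_mem
    intro b i hi
    have h0 : 0 ≤ i := (PySem.List.mem_pyRange_one.mp hi).1
    have : PySem.List.pyGetD (w :: t) (i + 1) ((0 : Int), (0 : Int))
        = PySem.List.pyGetD t i ((0 : Int), (0 : Int)) := by
      have hi' : i = ((i.toNat : Nat) : Int) := by omega
      rw [hi']
      unfold PySem.List.pyGetD
      rw [PySem.List.pyGet?_cons_succ]
    rw [this]
  rw [hcongr]
  exact PySem.List.foldl_pyRange_zero_pyGetD t ((0 : Int), (0 : Int)) F init

-- main invariant: A's swap chain scatters the ORIGINAL values, shifted by one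
theorem shift_eq (g0 : List (List Int)) :
    ∀ (t : List (Int × Int)) (g : List (List Int)) (tv : Int),
    g.map List.length = g0.map List.length →
    (∀ w ∈ t, PySem.Raise.InRange g.length w.1 ∧
        PySem.Raise.InRange (PySem.List.pyGetD g w.1 []).length w.2) →
    (∀ w ∈ t, cellGet g w.1 w.2 = cellGet g0 w.1 w.2) →
    ((t.map (nCo g)).Nodup) →
    (t.foldl (fun (st : List (List Int) × Int) w =>
        (cellSet st.1 w.1 w.2 st.2, cellGet st.1 w.1 w.2)) (g, tv)).1
      = (t.zip (tv :: t.map (fun w => cellGet g0 w.1 w.2))).foldl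
          (fun h wv => cellSet h wv.1.1 wv.1.2 wv.2) g := by
  intro t
  induction t with
  | nil => intro g tv _ _ _ _; simp
  | cons w t' ih =>
    intro g tv hsh hrange hinv hnd
    have hwr := hrange w (by simp)
    have hgw : cellGet g w.1 w.2 = cellGet g0 w.1 w.2 := hinv w (by simp)
    simp only [List.foldl_cons, List.map_cons, List.zip_cons_cons]
    set g' := cellSet g w.1 w.2 tv with hg'
    have hsh' : g'.map List.length = g.map List.length := shape_cellSet g w.1 w.2 tv
    have hlen' : g'.length = g.length := length_cellSet g w.1 w.2 tv
    have hget' : ∀ w' ∈ t', cellGet g' w'.1 w'.2 = cellGet g w'.1 w'.2 := by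
      intro w' hw'
      apply cellGet_cellSet_ne g w.1 w.2 w'.1 w'.2 tv hwr.1 hwr.2
      simp only [List.map_cons, List.nodup_cons] at hnd
      intro he
      exact hnd.1 (by
        have : nCo g w' = nCo g (w'.1, w'.2) := by cases w'; rfl
        rw [← this] at he
        rw [← he]
        exact List.mem_map_of_mem hw')
    rw [hgw]
    rw [ih g' (cellGet g0 w.1 w.2)
      (hsh'.trans hsh)
      (by
        intro w' hw'
        have h := hrange w' (by simp [hw'])
        constructor
        · rw [hlen']; exact h.1
        · have : (PySem.List.pyGetD g' w'.1 []).length = (PySem.List.pyGetD g w'.1 []).length :=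
            rowLen_congr g' g w'.1 hsh'
          rw [this]; exact h.2)
      (by
        intro w' hw'
        rw [hget' w' hw']
        exact hinv w' (by simp [hw']))
      (by
        have : t'.map (nCo g') = t'.map (nCo g) := by
          apply List.map_congr_left
          intro w' _
          exact nCo_congr g' g w' hsh'
        rw [this]
        simp only [List.map_cons, List.nodup_cons] at hnd
        exact hnd.2)]

-- ===== VERDICT (by name: the statement is the Claim_ definition above) =====
theorem moving_wind_spec : Claim_equal_moving_wind := by
  intro change_area wind _hdom hpre
  obtain ⟨hne, hrange, hnd⟩ := hpre
  unfold Spec_moving_wind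
  cases wind with
  | nil => exact absurd rfl hne
  | cons w0 rest =>
    unfold moving_wind moving_wind_alt
    simp only [PySem.List.pyGetD_zero_cons, List.drop_succ_cons, List.drop_zero, List.map_cons]
    rw [foldl_range_shift w0 rest
      (fun (st : List (List Int) × Int) w =>
        (cellSet st.1 w.1 w.2 st.2, cellGet st.1 w.1 w.2))]
    have hw0 := hrange w0 (by simp)
    set g1 := cellSet change_area w0.1 w0.2 0 with hg1
    have hsh1 : g1.map List.length = change_area.map List.length :=
      shape_cellSet change_area w0.1 w0.2 0
    have hlen1 : g1.length = change_area.length := length_cellSet change_area w0.1 w0.2 0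
    simp only [List.map_cons, List.nodup_cons] at hnd
    have hget1 : ∀ w ∈ rest, cellGet g1 w.1 w.2 = cellGet change_area w.1 w.2 := by
      intro w hw
      apply cellGet_cellSet_ne change_area w0.1 w0.2 w.1 w.2 0 hw0.1 hw0.2
      intro he
      exact hnd.1 (by
        have h1 : nCo change_area w = nCo change_area (w.1, w.2) := by cases w; rfl
        have h2 : nCo change_area w0 = nCo change_area (w0.1, w0.2) := by cases w0; rfl
        rw [← h1] at he
        rw [h2, ← he]
        exact List.mem_map_of_mem hw)
    exact shift_eq change_area rest g1 (cellGet change_area w0.1 w0.2)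
      hsh1
      (by
        intro w hw
        have h := hrange w (by simp [hw])
        constructor
        · rw [hlen1]; exact h.1
        · rw [rowLen_congr g1 change_area w.1 hsh1]; exact h.2)
      hget1
      (by
        have : rest.map (nCo g1) = rest.map (nCo change_area) := by
          apply List.map_congr_left
          intro w _
          exact nCo_congr g1 change_area w hsh1
        rw [this]
        exact hnd.2)
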